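-- pv_equiv track=rewrite | github.com/huangjus/row_puzzle.py | row_puzzle.py | row_puzzle
-- ===== SOURCE A (Python) =====
-- def row_puzzle(row, current_index=0, visited=None):
--     """
--     Check if a given row puzzle is solvable.
--
--     A row puzzle is a list of non-negative integers with a zero in the rightmost square.
--     The function starts with a token on the leftmost square, and on each turn, the token can shift
--     left or right a number of squares exactly equal to the value in its current square, but is not allowed
--     to move off either end. The goal is to get the token to the rightmost square.
--     """
--     if visited is None:
--         visited = set()
--     if current_index < 0 or current_index >= len(row) or current_index in visited:
--         return False
--     if row[current_index] == 0:
--         return True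
--     visited.add(current_index)
--     return row_puzzle(row, current_index + row[current_index], visited) \
--            or row_puzzle(row, current_index - row[current_index], visited)
-- ===== SOURCE B (Python) =====
-- def row_puzzle(row, current_index=0, visited=None):
--     """Iterative DFS over an explicit stack; out-of-range moves are filtered at
--     push time, so the stack only ever holds legal board positions (same return
--     value and same visited-set mutation as the recursive version)."""
--     if visited is None:
--         visited = set()
--     n = len(row)
--     stack = [current_index] if 0 <= current_index < n else []
--     while stack:
--         idx = stack.pop()
--         if idx in visited:
--             continue
--         step = row[idx]
--         if step == 0:
--             return True
--         visited.add(idx)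
--         for nxt in (idx - step, idx + step):
--             if 0 <= nxt < n:
--                 stack.append(nxt)
--     return False
-- ===== Notes on version B (the rewrite author's own statement) =====
-- stated objective: alternative
-- what changed: The recursive short-circuiting DFS is replaced by an iterative DFS with an explicit stack in which out-of-range moves are filtered at push time, so the pop step only checks visited/zero; neighbor order is preserved, and both versions mutate a caller-supplied visited set identically, though the proved equivalence is about the return value.
import Mathlib
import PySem

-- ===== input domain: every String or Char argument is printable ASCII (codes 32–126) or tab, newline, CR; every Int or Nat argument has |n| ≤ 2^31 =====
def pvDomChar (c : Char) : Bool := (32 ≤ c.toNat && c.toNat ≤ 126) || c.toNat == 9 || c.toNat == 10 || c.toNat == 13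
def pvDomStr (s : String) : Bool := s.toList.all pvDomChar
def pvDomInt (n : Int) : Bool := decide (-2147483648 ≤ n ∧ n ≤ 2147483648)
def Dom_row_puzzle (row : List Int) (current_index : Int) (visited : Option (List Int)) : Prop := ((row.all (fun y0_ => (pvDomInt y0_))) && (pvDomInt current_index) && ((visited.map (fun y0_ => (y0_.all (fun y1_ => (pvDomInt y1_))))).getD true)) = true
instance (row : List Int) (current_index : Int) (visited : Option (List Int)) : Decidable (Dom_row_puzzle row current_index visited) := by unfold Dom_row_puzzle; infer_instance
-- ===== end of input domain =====

-- B replaces A's recursive DFS by an iterative DFS over an explicit stack with out-of-range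
-- moves filtered at push time; the equivalence proved here is about the RETURN value only —
-- both Pythons mutate a caller-supplied `visited` set (identically, in fact).

-- ===== PORT A =====
-- A's recursion, with the mutated `visited` set threaded through as state.
-- The Nat argument is a fuel guard making the recursion structural; with the fuel
-- row.length + 1 used below the 0-branch is never reached (each nested call adds one
-- in-range index to visited — see pvDfsA_stable below).
def pvDfsA (row : List Int) : Nat → Int → PySem.Set Int → Bool × PySem.Set Int
  | 0, _, visited => (false, visited)
  | n + 1, i, visited =>
    if i < 0 ∨ (row.length : Int) ≤ i ∨ PySem.Set.contains visited i then (false, visited)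
    else
      -- row[current_index]: i is in range here, so pyGet? is some
      let r := (PySem.List.pyGet? row i).getD 0
      if r = 0 then (true, visited)
      else
        let visited' := PySem.Set.add visited i
        let p := pvDfsA row n (i + r) visited'
        if p.1 then (true, p.2) else pvDfsA row n (i - r) p.2

def row_puzzle (row : List Int) (current_index : Int) (visited : Option (List Int)) : Bool :=
  let v0 : PySem.Set Int := match visited with
    | none => PySem.Set.empty
    | some l => PySem.Set.ofList l
  (pvDfsA row (row.length + 1) current_index v0).1

-- ===== PORT B =====
-- B's while-loop (list head = top of stack).  The pop step checks only `idx in visited`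
-- and `row[idx] == 0`; the `for nxt in (idx - step, idx + step)` push loop is the foldl,
-- which filters `0 <= nxt < n` exactly as Source B does, so the stack holds only legal
-- positions and `row[idx]` is always defined (the none branch of the match is unreachable).
-- The Nat argument is a fuel guard: each iteration pops one entry or marks a fresh index.
def pvLoopB (row : List Int) : Nat → List Int → PySem.Set Int → Bool
  | 0, _, _ => false
  | _ + 1, [], _ => false
  | fuel + 1, idx :: rest, visited =>
    if PySem.Set.contains visited idx then pvLoopB row fuel rest visited
    else
      match PySem.List.pyGet? row idx with
      | none => false
      | some step =>
        if step = 0 then true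
        else
          pvLoopB row fuel
            ([idx - step, idx + step].foldl
              (fun s nxt => if 0 ≤ nxt ∧ nxt < (row.length : Int) then nxt :: s else s) rest)
            (PySem.Set.add visited idx)

def row_puzzle_alt (row : List Int) (current_index : Int) (visited : Option (List Int)) : Bool :=
  let v0 : PySem.Set Int := match visited with
    | none => PySem.Set.empty
    | some l => PySem.Set.ofList l
  let stack0 : List Int :=
    if 0 ≤ current_index ∧ current_index < (row.length : Int) then [current_index] else []
  pvLoopB row (2 * row.length + 2) stack0 v0

-- ===== PRECONDITION & SPEC =====
def Spec_row_puzzle (row : List Int) (current_index : Int) (visited : Option (List Int)) (out : Bool) : Prop := out = row_puzzle_alt row current_index visited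
instance (row : List Int) (current_index : Int) (visited : Option (List Int)) (out : Bool) : Decidable (Spec_row_puzzle row current_index visited out) := by unfold Spec_row_puzzle; infer_instance

-- ===== CLAIM (what is proved, stated in full; the proofs are below) =====
def Claim_equal_row_puzzle : Prop := ∀ (row : List Int) (current_index : Int) (visited : Option (List Int)), Dom_row_puzzle row current_index visited → Spec_row_puzzle row current_index visited (row_puzzle row current_index visited)

-- ===== LEMMAS AND PROOFS =====

lemma pvDfsA_succ (row : List Int) (n : Nat) (i : Int) (V : PySem.Set Int) :
    pvDfsA row (n + 1) i V =
      if i < 0 ∨ (row.length : Int) ≤ i ∨ PySem.Set.contains V i then (false, V)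
      else if (PySem.List.pyGet? row i).getD 0 = 0 then (true, V)
      else if (pvDfsA row n (i + (PySem.List.pyGet? row i).getD 0) (PySem.Set.add V i)).1 then
        (true, (pvDfsA row n (i + (PySem.List.pyGet? row i).getD 0) (PySem.Set.add V i)).2)
      else pvDfsA row n (i - (PySem.List.pyGet? row i).getD 0)
        (pvDfsA row n (i + (PySem.List.pyGet? row i).getD 0) (PySem.Set.add V i)).2 := rfl

lemma pvDfsA_out (row : List Int) (n : Nat) (i : Int) (V : PySem.Set Int)
    (h : i < 0 ∨ (row.length : Int) ≤ i) :
    pvDfsA row (n + 1) i V = (false, V) := by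
  rw [pvDfsA_succ, if_pos (h.elim Or.inl (fun h2 => Or.inr (Or.inl h2)))]

def pvCardR (row : List Int) (V : List Int) : Nat :=
  (V.filter (fun j => decide (0 ≤ j ∧ j < (row.length : Int)))).length

lemma pvCardR_le (row : List Int) (V : List Int) (h : V.Nodup) :
    pvCardR row V ≤ row.length := by
  unfold pvCardR
  set W := V.filter (fun j => decide (0 ≤ j ∧ j < (row.length : Int))) with hW
  have hnd : W.Nodup := h.filter _
  have hlen : W.length = W.toFinset.card := (List.toFinset_card_of_nodup hnd).symm
  have hsub : W.toFinset ⊆ Finset.Ico (0:Int) (row.length : Int) := by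
    intro x hx
    rw [List.mem_toFinset, hW, List.mem_filter] at hx
    simp at hx
    exact Finset.mem_Ico.2 ⟨hx.2.1, hx.2.2⟩
  have := Finset.card_le_card hsub
  rw [Int.card_Ico] at this
  omega

lemma pvCardR_add_of_new (row : List Int) (V : PySem.Set Int) (i : Int)
    (hmem : ¬ i ∈ V) (h0 : 0 ≤ i) (h1 : i < (row.length : Int)) :
    pvCardR row (PySem.Set.add V i) = pvCardR row V + 1 := by
  unfold pvCardR
  simp [PySem.Set.add, hmem, List.filter_append, h0, h1]

lemma pvDfsA_inv (row : List Int) :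
    ∀ n i V, V.Nodup →
      (pvDfsA row n i V).2.Nodup ∧ pvCardR row V ≤ pvCardR row (pvDfsA row n i V).2 := by
  intro n
  induction n with
  | zero => intro i V h; exact ⟨h, le_refl _⟩
  | succ n ih =>
    intro i V h
    simp only [pvDfsA]
    split_ifs with h1 h2 h3
    · exact ⟨h, le_refl _⟩
    · exact ⟨h, le_refl _⟩
    all_goals (
      have hmem : ¬ i ∈ V := fun hm =>
        h1 (Or.inr (Or.inr ((PySem.Set.contains_iff V i).2 hm)))
      have hge : ¬ i < 0 := fun hlt => h1 (Or.inl hlt)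
      have hlt : ¬ (row.length : Int) ≤ i := fun hle => h1 (Or.inr (Or.inl hle))
      have hV' : (PySem.Set.add V i).Nodup := PySem.Set.nodup_add V i h
      have hcV' : pvCardR row (PySem.Set.add V i) = pvCardR row V + 1 :=
        pvCardR_add_of_new row V i hmem (by omega) (by omega)
      have h1inv := ih (i + (PySem.List.pyGet? row i).getD 0) (PySem.Set.add V i) hV')
    · refine ⟨h1inv.1, ?_⟩
      show pvCardR row V ≤ pvCardR row (pvDfsA row n (i + (PySem.List.pyGet? row i).getD 0) (PySem.Set.add V i)).2
      omega
    · have h2inv := ih (i - (PySem.List.pyGet? row i).getD 0)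
        (pvDfsA row n (i + (PySem.List.pyGet? row i).getD 0) (PySem.Set.add V i)).2 h1inv.1
      exact ⟨h2inv.1, by omega⟩

lemma pvDfsA_stable (row : List Int) :
    ∀ t n m i (V : PySem.Set Int), V.Nodup → row.length - pvCardR row V ≤ t →
      row.length ≤ pvCardR row V + n → row.length ≤ pvCardR row V + m →
      pvDfsA row (n + 1) i V = pvDfsA row (m + 1) i V := by
  intro t
  induction t with
  | zero =>
    intro n m i V h ht hn hm
    by_cases h1 : i < 0 ∨ (row.length : Int) ≤ i ∨ PySem.Set.contains V i = true
    · rw [pvDfsA_succ, pvDfsA_succ, if_pos h1, if_pos h1]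
    by_cases h2 : (PySem.List.pyGet? row i).getD 0 = 0
    · rw [pvDfsA_succ, pvDfsA_succ, if_neg h1, if_neg h1, if_pos h2, if_pos h2]
    · -- expand is impossible: cardR V = row.length but i is a new in-range index
      exfalso
      have hmem : ¬ i ∈ V := fun hmm =>
        h1 (Or.inr (Or.inr ((PySem.Set.contains_iff V i).2 hmm)))
      have hcV' : pvCardR row (PySem.Set.add V i) = pvCardR row V + 1 :=
        pvCardR_add_of_new row V i hmem (by omega) (by omega)
      have hle := pvCardR_le row (PySem.Set.add V i) (PySem.Set.nodup_add V i h)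
      omega
  | succ t ih =>
    intro n m i V h ht hn hm
    by_cases h1 : i < 0 ∨ (row.length : Int) ≤ i ∨ PySem.Set.contains V i = true
    · rw [pvDfsA_succ, pvDfsA_succ, if_pos h1, if_pos h1]
    by_cases h2 : (PySem.List.pyGet? row i).getD 0 = 0
    · rw [pvDfsA_succ, pvDfsA_succ, if_neg h1, if_neg h1, if_pos h2, if_pos h2]
    · -- expand
      have hmem : ¬ i ∈ V := fun hmm =>
        h1 (Or.inr (Or.inr ((PySem.Set.contains_iff V i).2 hmm)))
      have hV' : (PySem.Set.add V i).Nodup := PySem.Set.nodup_add V i h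
      have hcV' : pvCardR row (PySem.Set.add V i) = pvCardR row V + 1 :=
        pvCardR_add_of_new row V i hmem (by omega) (by omega)
      have hleV' := pvCardR_le row (PySem.Set.add V i) hV'
      obtain ⟨n', rfl⟩ : ∃ n', n = n' + 1 := ⟨n - 1, by omega⟩
      obtain ⟨m', rfl⟩ : ∃ m', m = m' + 1 := ⟨m - 1, by omega⟩
      set r := (PySem.List.pyGet? row i).getD 0 with hr
      have hfst : pvDfsA row (n' + 1) (i + r) (PySem.Set.add V i)
          = pvDfsA row (m' + 1) (i + r) (PySem.Set.add V i) :=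
        ih n' m' (i + r) (PySem.Set.add V i) hV' (by omega) (by omega) (by omega)
      have hinv := pvDfsA_inv row (m' + 1) (i + r) (PySem.Set.add V i) hV'
      have hsnd : pvDfsA row (n' + 1) (i - r)
            (pvDfsA row (m' + 1) (i + r) (PySem.Set.add V i)).2
          = pvDfsA row (m' + 1) (i - r)
            (pvDfsA row (m' + 1) (i + r) (PySem.Set.add V i)).2 :=
        ih n' m' (i - r) _ hinv.1 (by omega) (by omega) (by omega)
      rw [pvDfsA_succ row (n' + 1), pvDfsA_succ row (m' + 1), if_neg h1, if_neg h1,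
        if_neg h2, if_neg h2, ← hr, hfst, hsnd]

-- A's whole computation replayed over a stack of pending start indices, each with full fuel.
def pvDfsList (row : List Int) : List Int → PySem.Set Int → Bool
  | [], _ => false
  | i :: rest, V =>
    let p := pvDfsA row (row.length + 1) i V
    if p.1 then true else pvDfsList row rest p.2

lemma pvDfsList_cons (row : List Int) (i : Int) (rest : List Int) (V : PySem.Set Int) :
    pvDfsList row (i :: rest) V =
      if (pvDfsA row (row.length + 1) i V).1 then true
      else pvDfsList row rest (pvDfsA row (row.length + 1) i V).2 := rfl

lemma pvDfsList_skip (row : List Int) (i : Int) (rest : List Int) (V : PySem.Set Int)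
    (h : ¬ (0 ≤ i ∧ i < (row.length : Int))) :
    pvDfsList row (i :: rest) V = pvDfsList row rest V := by
  rw [pvDfsList_cons, pvDfsA_out row row.length i V (by omega)]
  simp

lemma pvDfsA_fuel_eq (row : List Int) (n : Nat) (i : Int) (V : PySem.Set Int)
    (h : V.Nodup) (hn : row.length + 1 ≤ pvCardR row V + n) (hn1 : 1 ≤ n) :
    pvDfsA row n i V = pvDfsA row (row.length + 1) i V := by
  obtain ⟨n', rfl⟩ : ∃ n', n = n' + 1 := ⟨n - 1, by omega⟩
  exact pvDfsA_stable row row.length n' row.length i V h (by omega) (by omega) (by omega)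

lemma pvLoopB_bridge (row : List Int) :
    ∀ fuel (stack : List Int) (V : PySem.Set Int), V.Nodup →
      (∀ x ∈ stack, 0 ≤ x ∧ x < (row.length : Int)) →
      stack.length + 2 * (row.length - pvCardR row V) < fuel →
      pvLoopB row fuel stack V = pvDfsList row stack V := by
  intro fuel
  induction fuel with
  | zero => intro stack V _ _ hf; omega
  | succ n ih =>
    intro stack V h hin hf
    match stack with
    | [] => rfl
    | i :: rest =>
      have hi := hin i (List.mem_cons_self ..)
      have hrest : ∀ x ∈ rest, 0 ≤ x ∧ x < (row.length : Int) :=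
        fun x hx => hin x (List.mem_cons_of_mem _ hx)
      obtain ⟨r, hr⟩ : ∃ r, PySem.List.pyGet? row i = some r :=
        ⟨_, PySem.List.pyGet?_eq_some_getElem row hi.1 hi.2⟩
      have hgd : (PySem.List.pyGet? row i).getD 0 = r := by rw [hr]; rfl
      by_cases hc : PySem.Set.contains V i = true
      · have h1 : i < 0 ∨ (row.length : Int) ≤ i ∨ PySem.Set.contains V i = true :=
          Or.inr (Or.inr hc)
        rw [show pvLoopB row (n+1) (i :: rest) V = pvLoopB row n rest V by
            simp only [pvLoopB, hc]; rfl]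
        rw [pvDfsList_cons, pvDfsA_succ, if_pos h1]
        exact ih rest V h hrest (by simp at hf ⊢; omega)
      · have h1 : ¬ (i < 0 ∨ (row.length : Int) ≤ i ∨ PySem.Set.contains V i = true) := by
          push Not; exact ⟨by omega, by omega, by simpa using hc⟩
        by_cases h2 : r = 0
        · rw [show pvLoopB row (n+1) (i :: rest) V = true by
              simp only [pvLoopB, hc, hr]; simp [h2]]
          rw [pvDfsList_cons, pvDfsA_succ, if_neg h1, hgd, if_pos h2]
          simp
        · -- expand
          have hmem : ¬ i ∈ V := fun hmm => hc ((PySem.Set.contains_iff V i).2 hmm)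
          have hV' : (PySem.Set.add V i).Nodup := PySem.Set.nodup_add V i h
          have hcV' : pvCardR row (PySem.Set.add V i) = pvCardR row V + 1 :=
            pvCardR_add_of_new row V i hmem hi.1 hi.2
          have hleV' := pvCardR_le row (PySem.Set.add V i) hV'
          have hL : 1 ≤ row.length := by omega
          -- B's push foldl, evaluated
          have hfold : [i - r, i + r].foldl
              (fun s nxt => if 0 ≤ nxt ∧ nxt < (row.length : Int) then nxt :: s else s) rest
              = (if 0 ≤ i + r ∧ i + r < (row.length : Int) then [i + r] else [])
                ++ (if 0 ≤ i - r ∧ i - r < (row.length : Int) then [i - r] else []) ++ rest := by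
            simp only [List.foldl]
            split_ifs <;> simp
          -- A side: same unfolding as before, with full-fuel stabilisation
          have hfuel1 : pvDfsA row row.length (i + r) (PySem.Set.add V i)
              = pvDfsA row (row.length + 1) (i + r) (PySem.Set.add V i) :=
            pvDfsA_fuel_eq row row.length (i + r) (PySem.Set.add V i) hV' (by omega) hL
          have hinv := pvDfsA_inv row (row.length + 1) (i + r) (PySem.Set.add V i) hV'
          have hfuel2 : pvDfsA row row.length (i - r)
                (pvDfsA row (row.length + 1) (i + r) (PySem.Set.add V i)).2
              = pvDfsA row (row.length + 1) (i - r)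
                (pvDfsA row (row.length + 1) (i + r) (PySem.Set.add V i)).2 :=
            pvDfsA_fuel_eq row row.length (i - r) _ hinv.1 (by omega) hL
          rw [show pvLoopB row (n+1) (i :: rest) V
              = pvLoopB row n ([i - r, i + r].foldl
                  (fun s nxt => if 0 ≤ nxt ∧ nxt < (row.length : Int) then nxt :: s else s) rest)
                  (PySem.Set.add V i) by
            simp only [pvLoopB, hc, hr]; simp [h2]]
          have hin' : ∀ x ∈ [i - r, i + r].foldl
              (fun s nxt => if 0 ≤ nxt ∧ nxt < (row.length : Int) then nxt :: s else s) rest,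
              0 ≤ x ∧ x < (row.length : Int) := by
            rw [hfold]; intro x hx
            simp only [List.mem_append] at hx
            rcases hx with (hx | hx) | hx
            · split_ifs at hx with hb
              · simp at hx; omega
              · simp at hx
            · split_ifs at hx with hb
              · simp at hx; omega
              · simp at hx
            · exact hrest x hx
          have hlen : ([i - r, i + r].foldl
              (fun s nxt => if 0 ≤ nxt ∧ nxt < (row.length : Int) then nxt :: s else s)
              rest).length ≤ rest.length + 2 := by
            rw [hfold]; split_ifs <;> simp
          rw [ih _ (PySem.Set.add V i) hV' hin' (by simp only [List.length_cons] at hf; omega)]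
          rw [hfold]
          -- reduce B's filtered stack to the unfiltered two-push stack on A's side
          have hBside : pvDfsList row
              ((if 0 ≤ i + r ∧ i + r < (row.length : Int) then [i + r] else [])
                ++ (if 0 ≤ i - r ∧ i - r < (row.length : Int) then [i - r] else []) ++ rest)
              (PySem.Set.add V i)
              = pvDfsList row ((i + r) :: (i - r) :: rest) (PySem.Set.add V i) := by
            by_cases hp : 0 ≤ i + r ∧ i + r < (row.length : Int)
            · by_cases hq : 0 ≤ i - r ∧ i - r < (row.length : Int)
              · rw [if_pos hp, if_pos hq]; rfl
              · rw [if_pos hp, if_neg hq, List.append_nil, List.singleton_append,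
                  pvDfsList_cons row (i + r) rest (PySem.Set.add V i),
                  pvDfsList_cons row (i + r) ((i - r) :: rest) (PySem.Set.add V i),
                  pvDfsList_skip row (i - r) rest _ hq]
            · by_cases hq : 0 ≤ i - r ∧ i - r < (row.length : Int)
              · rw [if_neg hp, if_pos hq, List.nil_append, List.singleton_append,
                  pvDfsList_skip row (i + r) ((i - r) :: rest) (PySem.Set.add V i) hp]
              · rw [if_neg hp, if_neg hq, List.nil_append, List.nil_append,
                  pvDfsList_skip row (i + r) ((i - r) :: rest) (PySem.Set.add V i) hp,
                  pvDfsList_skip row (i - r) rest (PySem.Set.add V i) hq]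
          rw [hBside]
          -- A side unfolding
          rw [pvDfsList_cons row i rest V, pvDfsList_cons, pvDfsList_cons,
            pvDfsA_succ row row.length i V, if_neg h1, hgd, if_neg h2, hfuel1, hfuel2]
          set p := pvDfsA row (row.length + 1) (i + r) (PySem.Set.add V i) with hp
          set q := pvDfsA row (row.length + 1) (i - r) p.2 with hq
          by_cases hb1 : p.1 = true
          · simp [hb1]
          · simp [hb1]

lemma pvLoopB_nil (row : List Int) (fuel : Nat) (V : PySem.Set Int) :
    pvLoopB row fuel [] V = false := by
  cases fuel <;> rfl

lemma pvMain (row : List Int) (ci : Int) (v0 : PySem.Set Int) (hnd : v0.Nodup) :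
    (pvDfsA row (row.length + 1) ci v0).1
      = pvLoopB row (2 * row.length + 2)
          (if 0 ≤ ci ∧ ci < (row.length : Int) then [ci] else []) v0 := by
  have hcard := pvCardR_le row v0 hnd
  by_cases hr : 0 ≤ ci ∧ ci < (row.length : Int)
  · rw [if_pos hr,
      pvLoopB_bridge row (2 * row.length + 2) [ci] v0 hnd
        (by intro x hx; simp at hx; subst hx; exact hr)
        (by simp only [List.length_cons, List.length_nil]; omega),
      pvDfsList_cons]
    by_cases hp : (pvDfsA row (row.length + 1) ci v0).1 = true
    · simp [hp]
    · simp [hp, pvDfsList]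
  · rw [if_neg hr, pvDfsA_out row row.length ci v0 (by omega), pvLoopB_nil]

-- ===== VERDICT (by name: the statement is the Claim_ definition above) =====
theorem row_puzzle_spec : Claim_equal_row_puzzle := by
  intro row current_index visited _
  unfold Spec_row_puzzle row_puzzle row_puzzle_alt
  cases visited with
  | none => exact pvMain row current_index PySem.Set.empty (by simp [PySem.Set.empty])
  | some l => exact pvMain row current_index (PySem.Set.ofList l) (PySem.Set.nodup_ofList l)
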